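-- pv_equiv track=rewrite | github.com/NeuralBlitz/fishstick | fishstick/data_processing/streaming.py | stream_batches
-- ===== SOURCE A (Python) =====
-- from typing import (
--     Optional,
--     Callable,
--     List,
--     Union,
--     Dict,
--     Any,
--     Tuple,
--     Iterator,
--     Iterable,
--     TypeVar,
--     Generic,
-- )
--
-- T = TypeVar("T")
--
-- def stream_batches(
--     data: Iterable[T],
--     batch_size: int = 32,
--     drop_last: bool = False,
-- ) -> Iterator[List[T]]:
--     """
--     Create batches from a stream.
--
--     Args:
--         data: Input data stream
--         batch_size: Batch size
--         drop_last: Whether to drop incomplete last batch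
--
--     Yields:
--         Batches of data
--     """
--     batch: List[T] = []
--
--     for item in data:
--         batch.append(item)
--
--         if len(batch) >= batch_size:
--             yield batch
--             batch = []
--
--     if batch and not drop_last:
--         yield batch
-- ===== SOURCE B (Python) =====
-- from itertools import islice
--
-- def stream_batches(data, batch_size=32, drop_last=False):
--     it = iter(data)
--     while True:
--         batch = list(islice(it, batch_size))
--         if len(batch) < batch_size:
--             if batch and not drop_last:
--                 yield batch
--             break
--         yield batch
-- ===== Notes on version B (the rewrite author's own statement) =====
-- stated objective: idiomatic
-- what changed: B pulls fixed-size slices from a single iterator with itertools.islice instead of appending item-by-item while re-checking the running batch length.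
-- outside the precondition, e.g. on stream_batches([1, 2, 3], 0, False): A returns [[1], [2], [3]], B does not finish within the time limit; on stream_batches([1, 2], -1, False): A returns [[1], [2]], B raises ValueError
import Mathlib
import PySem

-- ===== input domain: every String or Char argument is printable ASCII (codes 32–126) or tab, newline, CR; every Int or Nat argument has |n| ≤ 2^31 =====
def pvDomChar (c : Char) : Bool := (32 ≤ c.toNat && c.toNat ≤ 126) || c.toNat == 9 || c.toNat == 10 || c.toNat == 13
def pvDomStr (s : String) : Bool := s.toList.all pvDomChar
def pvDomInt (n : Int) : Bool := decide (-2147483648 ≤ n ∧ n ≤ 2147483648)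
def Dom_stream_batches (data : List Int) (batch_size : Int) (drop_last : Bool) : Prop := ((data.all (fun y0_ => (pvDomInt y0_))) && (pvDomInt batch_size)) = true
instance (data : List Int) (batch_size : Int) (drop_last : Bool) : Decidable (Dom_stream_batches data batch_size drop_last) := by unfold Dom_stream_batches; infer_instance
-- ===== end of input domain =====

-- B is the idiomatic islice formulation (pull fixed-size slices from one iterator)
-- instead of A's item-by-item append with a running length check; equal for batch_size ≥ 1.

-- ===== PORT A =====
-- A: accumulate items one by one; flush the batch whenever len(batch) >= batch_size;
-- after the loop yield the leftover batch if non-empty and not drop_last.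
def stream_batches (data : List Int) (batch_size : Int) (drop_last : Bool) : List (List Int) :=
  let st := data.foldl
    (fun (st : List (List Int) × List Int) item =>
      let b := st.2 ++ [item]
      if batch_size ≤ (b.length : Int) then (st.1 ++ [b], ([] : List Int)) else (st.1, b))
    ([], [])
  if !st.2.isEmpty && !drop_last then st.1 ++ [st.2] else st.1

-- ===== PORT B =====
-- B: repeatedly take a slice of batch_size items (islice); a short slice ends the loop,
-- yielded only when non-empty and not drop_last. The fuel argument is a totality guard only
-- (Python B diverges/raises for batch_size ≤ 0, which Pre_ excludes).
def altGo (fuel : Nat) (batch_size : Int) (drop_last : Bool) (xs : List Int) : List (List Int) :=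
  match fuel with
  | 0 => []
  | fuel + 1 =>
    let batch := xs.take batch_size.toNat
    if (batch.length : Int) < batch_size then
      (if batch.isEmpty || drop_last then [] else [batch])
    else
      batch :: altGo fuel batch_size drop_last (xs.drop batch_size.toNat)

def stream_batches_alt (data : List Int) (batch_size : Int) (drop_last : Bool) : List (List Int) :=
  altGo (data.length + 1) batch_size drop_last data

-- ===== PRECONDITION & SPEC =====
-- Pre_ excludes batch_size ≤ 0: A's singleton batches there are an accident of its
-- 'len(batch) >= batch_size' check, while B's islice loop raises ValueError (negative)
-- or diverges (zero), so no common return value exists.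
def Pre_stream_batches (data : List Int) (batch_size : Int) (drop_last : Bool) : Prop :=
  1 ≤ batch_size
instance (data : List Int) (batch_size : Int) (drop_last : Bool) : Decidable (Pre_stream_batches data batch_size drop_last) := by unfold Pre_stream_batches; infer_instance

def pvWitness_stream_batches : List Int × Int × Bool := ([1, 2, 3], 2, false)

def Spec_stream_batches (data : List Int) (batch_size : Int) (drop_last : Bool) (out : List (List Int)) : Prop := out = stream_batches_alt data batch_size drop_last
instance (data : List Int) (batch_size : Int) (drop_last : Bool) (out : List (List Int)) : Decidable (Spec_stream_batches data batch_size drop_last out) := by unfold Spec_stream_batches; infer_instance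

-- ===== CLAIM (what is proved, stated in full; the proofs are below) =====
def Claim_equal_stream_batches : Prop := ∀ (data : List Int) (batch_size : Int) (drop_last : Bool), Dom_stream_batches data batch_size drop_last → Pre_stream_batches data batch_size drop_last → Spec_stream_batches data batch_size drop_last (stream_batches data batch_size drop_last)

-- ===== LEMMAS AND PROOFS =====

-- A's fold body, named for the lemmas.
def stepA (batch_size : Int) (st : List (List Int) × List Int) (item : Int) :
    List (List Int) × List Int :=
  let b := st.2 ++ [item]
  if batch_size ≤ (b.length : Int) then (st.1 ++ [b], ([] : List Int)) else (st.1, b)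

-- If the whole remaining input cannot fill the batch, the fold never flushes.
theorem foldA_no_flush (batch_size : Int) :
    ∀ (xs : List Int) (acc : List (List Int)) (cur : List Int),
      ((cur.length : Int) + xs.length < batch_size) →
      xs.foldl (stepA batch_size) (acc, cur) = (acc, cur ++ xs) := by
  intro xs
  induction xs with
  | nil => intro acc cur _; simp
  | cons x xs ih =>
    intro acc cur h
    simp only [List.foldl_cons, stepA]
    rw [if_neg (by simp at h ⊢; omega)]
    rw [ih acc (cur ++ [x]) (by simp at h ⊢; omega)]
    simp

-- Feeding exactly enough items to reach batch_size flushes once, ending with an empty batch.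
theorem foldA_fill (batch_size : Int) :
    ∀ (ys : List Int) (acc : List (List Int)) (cur : List Int),
      ys ≠ [] →
      ((cur.length : Int) + ys.length = batch_size) →
      ys.foldl (stepA batch_size) (acc, cur) = (acc ++ [cur ++ ys], []) := by
  intro ys
  induction ys with
  | nil => intro _ _ h _; exact absurd rfl h
  | cons y ys ih =>
    intro acc cur _ h
    simp only [List.foldl_cons, stepA]
    by_cases hy : ys = []
    · subst hy
      rw [if_pos (by simp at h ⊢; omega)]
      simp
    · rw [if_neg (by
        have : ys.length ≠ 0 := by simpa [List.length_eq_zero_iff] using hy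
        simp at h ⊢; omega)]
      rw [ih acc (cur ++ [y]) hy (by simp at h ⊢; omega)]
      simp

-- Main invariant: A's fold-then-finish from an empty current batch equals B's chunk loop.
theorem main_inv (batch_size : Int) (drop_last : Bool) (hbs : 1 ≤ batch_size) :
    ∀ (n : Nat) (xs : List Int) (acc : List (List Int)), xs.length ≤ n →
      (let st := xs.foldl (stepA batch_size) (acc, []);
       if !st.2.isEmpty && !drop_last then st.1 ++ [st.2] else st.1)
      = acc ++ altGo (n + 1) batch_size drop_last xs := by
  intro n
  induction n with
  | zero =>
    intro xs acc hlen
    have hxs : xs = [] := List.length_eq_zero_iff.mp (Nat.le_zero.mp hlen)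
    subst hxs
    simp [altGo]
    omega
  | succ n ih =>
    intro xs acc hlen
    by_cases hshort : (xs.length : Int) < batch_size
    · -- the fold never flushes; final batch is xs itself
      rw [foldA_no_flush batch_size xs acc [] (by simpa using hshort)]
      have htake : xs.take batch_size.toNat = xs :=
        List.take_of_length_le (by omega)
      simp only [altGo, htake]
      rw [if_pos hshort]
      cases hxe : xs.isEmpty <;> cases drop_last <;>
        simp_all [List.isEmpty_iff]
    · -- a full chunk: split xs, flush once, recurse
      have hge : batch_size ≤ (xs.length : Int) := by omega
      have hk : batch_size.toNat ≤ xs.length := by omega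
      have hk1 : 1 ≤ batch_size.toNat := by omega
      have hsplit : xs = xs.take batch_size.toNat ++ xs.drop batch_size.toNat :=
        (List.take_append_drop _ xs).symm
      have htlen : (xs.take batch_size.toNat).length = batch_size.toNat := by
        simp [Nat.min_eq_left hk]
      have htNe : xs.take batch_size.toNat ≠ [] := by
        intro h; rw [h] at htlen; simp at htlen; omega
      have hunf : altGo (n + 1 + 1) batch_size drop_last xs
          = xs.take batch_size.toNat
            :: altGo (n + 1) batch_size drop_last (xs.drop batch_size.toNat) := by
        conv_lhs => rw [altGo]
        rw [if_neg (by rw [htlen]; omega)]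
      rw [hunf]
      conv_lhs => rw [hsplit]
      rw [List.foldl_append]
      rw [foldA_fill batch_size _ acc [] htNe (by rw [htlen]; simp; omega)]
      simp only [List.nil_append]
      rw [ih (xs.drop batch_size.toNat) (acc ++ [xs.take batch_size.toNat])
        (by rw [List.length_drop]; omega)]
      simp

-- ===== VERDICT (by name: the statement is the Claim_ definition above) =====
theorem stream_batches_spec : Claim_equal_stream_batches := by
  intro data batch_size drop_last _ hpre
  show stream_batches data batch_size drop_last = stream_batches_alt data batch_size drop_last
  unfold stream_batches stream_batches_alt
  have hfun : (fun (st : List (List Int) × List Int) item =>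
      let b := st.2 ++ [item]
      if batch_size ≤ (b.length : Int) then (st.1 ++ [b], ([] : List Int)) else (st.1, b))
      = stepA batch_size := by
    funext st item; simp [stepA]
  rw [hfun]
  exact main_inv batch_size drop_last hpre data.length data [] (le_refl _)
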